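-- pv_equiv track=rewrite | github.com/g23guy/sca-patterns-devel | bin/patgen.py | __create_conditions_indented
-- ===== SOURCE A (Python) =====
-- def __create_conditions_indented(indent_to_level, condition_count):
-- 	indent = ''
-- 	these_conditions = ''
--
-- 	for i in range(int(indent_to_level)):
-- 		indent += '\t'
--
-- 	if( condition_count == 0 ):
-- 		these_conditions += str(indent) + "Core.updateStatus(Core.WARN, \"No conditions required\")\n"
-- 	elif( condition_count == 1 ):
-- 		these_conditions += str(indent) + "if( condition1() ):\n"
-- 		these_conditions += str(indent) + "\tCore.updateStatus(Core.CRIT, \"Condition1 Met\")\n"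
-- 		these_conditions += str(indent) + "else:\n"
-- 		these_conditions += str(indent) + "\tCore.updateStatus(Core.WARN, \"Condition1 not found\")\n"
-- 	elif( condition_count == 2 ):
-- 		these_conditions += str(indent) + "if( condition1() ):\n"
-- 		these_conditions += str(indent) + "\tif( condition2() ):\n"
-- 		these_conditions += str(indent) + "\t\tCore.updateStatus(Core.CRIT, \"Condition2 Met\")\n"
-- 		these_conditions += str(indent) + "\telse:\n"
-- 		these_conditions += str(indent) + "\t\tCore.updateStatus(Core.WARN, \"Condition2 not found\")\n"
-- 		these_conditions += str(indent) + "else:\n"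
-- 		these_conditions += str(indent) + "\tCore.updateStatus(Core.ERROR, \"Condition1 not found\")\n"
-- 	elif( condition_count == 3 ):
-- 		these_conditions += str(indent) + "if( condition1() ):\n"
-- 		these_conditions += str(indent) + "\tif( condition2() ):\n"
-- 		these_conditions += str(indent) + "\t\tif( condition3() ):\n"
-- 		these_conditions += str(indent) + "\t\t\tCore.updateStatus(Core.CRIT, \"Condition3 Met\")\n"
-- 		these_conditions += str(indent) + "\t\telse:\n"
-- 		these_conditions += str(indent) + "\t\t\tCore.updateStatus(Core.WARN, \"Condition3 not found\")\n"
-- 		these_conditions += str(indent) + "\telse:\n"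
-- 		these_conditions += str(indent) + "\t\tCore.updateStatus(Core.ERROR, \"Condition2 not found\")\n"
-- 		these_conditions += str(indent) + "else:\n"
-- 		these_conditions += str(indent) + "\tCore.updateStatus(Core.ERROR, \"Condition1 not found\")\n"
--
-- 	return these_conditions
-- ===== SOURCE B (Python) =====
-- def __create_conditions_indented(indent_to_level, condition_count):
--     indent = '\t' * int(indent_to_level)
--     if condition_count == 0:
--         return indent + 'Core.updateStatus(Core.WARN, "No conditions required")\n'
--     if condition_count != 1 and condition_count != 2 and condition_count != 3:
--         return ''
--     n = condition_count
--     parts = []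
--     for i in range(1, n + 1):
--         parts.append(indent + '\t' * (i - 1) + 'if( condition%d() ):\n' % i)
--     parts.append(indent + '\t' * n + 'Core.updateStatus(Core.CRIT, "Condition%d Met")\n' % n)
--     for i in range(n, 0, -1):
--         level = 'WARN' if i == n else 'ERROR'
--         parts.append(indent + '\t' * (i - 1) + 'else:\n')
--         parts.append(indent + '\t' * i + 'Core.updateStatus(Core.%s, "Condition%d not found")\n' % (level, i))
--     return ''.join(parts)
-- ===== Notes on version B (the rewrite author's own statement) =====
-- stated objective: simpler
-- what changed: B replaces A's four hard-coded if/elif branches of pasted string lines by one generic pair of loops that builds the nested if/else template for any count in 1..3 (descend appending 'if( conditionI() ):', then unwind appending the else/WARN/ERROR lines) and joins the parts, with the indent built by '\t' * n instead of a loop.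
import Mathlib
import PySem

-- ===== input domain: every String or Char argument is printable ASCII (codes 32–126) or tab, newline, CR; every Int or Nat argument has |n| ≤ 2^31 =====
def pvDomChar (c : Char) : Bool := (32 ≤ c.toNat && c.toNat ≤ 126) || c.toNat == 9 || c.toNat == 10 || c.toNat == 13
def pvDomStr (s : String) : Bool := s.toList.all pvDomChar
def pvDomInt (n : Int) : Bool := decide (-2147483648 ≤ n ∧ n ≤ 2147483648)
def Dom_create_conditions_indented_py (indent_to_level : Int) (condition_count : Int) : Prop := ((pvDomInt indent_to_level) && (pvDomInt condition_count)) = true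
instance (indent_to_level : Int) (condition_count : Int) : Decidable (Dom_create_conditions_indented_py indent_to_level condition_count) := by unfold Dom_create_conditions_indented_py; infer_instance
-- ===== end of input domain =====

-- B replaces A's four hard-coded branches by one generic loop that builds the nested
-- if/else template for any count in 1..3 (objective: simpler / more general code), same output.

-- ===== PORT A =====
-- literal transliteration of A: indent built by a for-loop over range(int(indent_to_level)),
-- then an if/elif chain of hard-coded string concatenations.
def create_conditions_indented_py (indent_to_level : Int) (condition_count : Int) : String :=
  let indent := (PySem.List.pyRange 0 indent_to_level 1).foldl (fun acc (_ : Int) => acc ++ "\t") ""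
  if condition_count = 0 then
    "" ++ (indent ++ "Core.updateStatus(Core.WARN, \"No conditions required\")\n")
  else if condition_count = 1 then
    "" ++ (indent ++ "if( condition1() ):\n")
       ++ (indent ++ "\tCore.updateStatus(Core.CRIT, \"Condition1 Met\")\n")
       ++ (indent ++ "else:\n")
       ++ (indent ++ "\tCore.updateStatus(Core.WARN, \"Condition1 not found\")\n")
  else if condition_count = 2 then
    "" ++ (indent ++ "if( condition1() ):\n")
       ++ (indent ++ "\tif( condition2() ):\n")
       ++ (indent ++ "\t\tCore.updateStatus(Core.CRIT, \"Condition2 Met\")\n")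
       ++ (indent ++ "\telse:\n")
       ++ (indent ++ "\t\tCore.updateStatus(Core.WARN, \"Condition2 not found\")\n")
       ++ (indent ++ "else:\n")
       ++ (indent ++ "\tCore.updateStatus(Core.ERROR, \"Condition1 not found\")\n")
  else if condition_count = 3 then
    "" ++ (indent ++ "if( condition1() ):\n")
       ++ (indent ++ "\tif( condition2() ):\n")
       ++ (indent ++ "\t\tif( condition3() ):\n")
       ++ (indent ++ "\t\t\tCore.updateStatus(Core.CRIT, \"Condition3 Met\")\n")
       ++ (indent ++ "\t\telse:\n")
       ++ (indent ++ "\t\t\tCore.updateStatus(Core.WARN, \"Condition3 not found\")\n")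
       ++ (indent ++ "\telse:\n")
       ++ (indent ++ "\t\tCore.updateStatus(Core.ERROR, \"Condition2 not found\")\n")
       ++ (indent ++ "else:\n")
       ++ (indent ++ "\tCore.updateStatus(Core.ERROR, \"Condition1 not found\")\n")
  else ""

-- ===== PORT B =====
-- '\t' * n  (Python string repetition; empty for n ≤ 0, exactly as Python)
def pvTabs (n : Int) : String := String.ofList (PySem.List.pyRepeat ['\t'] n)

-- literal transliteration of Source B: generic loops building the parts list, then ''.join
def create_conditions_indented_py_alt (indent_to_level : Int) (condition_count : Int) : String :=
  let indent := pvTabs indent_to_level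
  if condition_count = 0 then
    indent ++ "Core.updateStatus(Core.WARN, \"No conditions required\")\n"
  else if condition_count ≠ 1 ∧ condition_count ≠ 2 ∧ condition_count ≠ 3 then ""
  else
    let n := condition_count
    let parts : List String :=
      (PySem.List.pyRange 1 (n + 1) 1).foldl (fun acc i =>
        acc ++ [indent ++ pvTabs (i - 1) ++ "if( condition" ++ PySem.Int.toStr i ++ "() ):\n"]) []
    let parts := parts ++
      [indent ++ pvTabs n ++ "Core.updateStatus(Core.CRIT, \"Condition" ++ PySem.Int.toStr n ++ " Met\")\n"]
    let parts :=
      (PySem.List.pyRange n 0 (-1)).foldl (fun acc i =>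
        let level := if i = n then "WARN" else "ERROR"
        acc ++ [indent ++ pvTabs (i - 1) ++ "else:\n",
                indent ++ pvTabs i ++ "Core.updateStatus(Core." ++ level ++ ", \"Condition"
                  ++ PySem.Int.toStr i ++ " not found\")\n"]) parts
    PySem.Str.join "" parts

-- ===== PRECONDITION & SPEC =====
def Spec_create_conditions_indented_py (indent_to_level : Int) (condition_count : Int) (out : String) : Prop := out = create_conditions_indented_py_alt indent_to_level condition_count
instance (indent_to_level : Int) (condition_count : Int) (out : String) : Decidable (Spec_create_conditions_indented_py indent_to_level condition_count out) := by unfold Spec_create_conditions_indented_py; infer_instance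

-- ===== CLAIM (what is proved, stated in full; the proofs are below) =====
def Claim_equal_create_conditions_indented_py : Prop := ∀ (indent_to_level : Int) (condition_count : Int), Dom_create_conditions_indented_py indent_to_level condition_count → Spec_create_conditions_indented_py indent_to_level condition_count (create_conditions_indented_py indent_to_level condition_count)

-- ===== LEMMAS AND PROOFS =====

-- A's indent-building loop appends one tab per iteration
theorem foldl_tab_append (l : List Int) (s : String) :
    l.foldl (fun acc (_ : Int) => acc ++ "\t") s = s ++ String.ofList (List.replicate l.length '\t') := by
  induction l generalizing s with
  | nil => simp
  | cons x t ih =>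
      apply String.toList_inj.mp
      simp [List.foldl_cons, ih, List.replicate_succ]

-- A's indent loop equals B's '\t' * n
theorem indentA_eq (n : Int) :
    (PySem.List.pyRange 0 n 1).foldl (fun acc (_ : Int) => acc ++ "\t") "" = pvTabs n := by
  rw [foldl_tab_append, PySem.List.length_pyRange_one, pvTabs, PySem.List.pyRepeat_singleton]
  apply String.toList_inj.mp
  simp

-- ===== VERDICT (by name: the statement is the Claim_ definition above) =====
set_option maxRecDepth 8000 in
theorem create_conditions_indented_py_spec : Claim_equal_create_conditions_indented_py := by
  intro itl c _
  unfold Spec_create_conditions_indented_py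
  unfold create_conditions_indented_py create_conditions_indented_py_alt
  rw [indentA_eq]
  generalize pvTabs itl = s
  by_cases h0 : c = 0
  · subst h0
    apply String.toList_inj.mp
    simp
  · by_cases h1 : c = 1
    · subst h1
      have e1 : PySem.List.pyRange (1 : Int) 2 1 = [1] := by decide
      have e2 : PySem.List.pyRange (1 : Int) 0 (-1) = [1] := by decide
      have e3 : PySem.Int.toChars 1 = ['1'] := by decide
      apply String.toList_inj.mp
      simp [e1, e2, pvTabs, PySem.Str.join, PySem.List.pyRepeat_singleton,
            PySem.Chars.join_cons_cons, PySem.Chars.join_singleton,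
            PySem.Int.toList_toStr, e3]
    · by_cases h2 : c = 2
      · subst h2
        have e1 : PySem.List.pyRange (1 : Int) 3 1 = [1, 2] := by decide
        have e2 : PySem.List.pyRange (2 : Int) 0 (-1) = [2, 1] := by decide
        have e3 : PySem.Int.toChars 1 = ['1'] := by decide
        have e4 : PySem.Int.toChars 2 = ['2'] := by decide
        apply String.toList_inj.mp
        simp [h1, e1, e2, pvTabs, PySem.Str.join, PySem.List.pyRepeat_singleton,
              PySem.Chars.join_cons_cons, PySem.Chars.join_singleton,
              PySem.Int.toList_toStr, e3, e4]
      · by_cases h3 : c = 3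
        · subst h3
          have e1 : PySem.List.pyRange (1 : Int) 4 1 = [1, 2, 3] := by decide
          have e2 : PySem.List.pyRange (3 : Int) 0 (-1) = [3, 2, 1] := by decide
          have e3 : PySem.Int.toChars 1 = ['1'] := by decide
          have e4 : PySem.Int.toChars 2 = ['2'] := by decide
          have e5 : PySem.Int.toChars 3 = ['3'] := by decide
          apply String.toList_inj.mp
          simp [h1, e1, e2, pvTabs, PySem.Str.join, PySem.List.pyRepeat_singleton,
                PySem.Chars.join_cons_cons, PySem.Chars.join_singleton,
                PySem.Int.toList_toStr, e3, e4, e5]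
        · simp [h0, h1, h2, h3]
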